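-- pv_equiv track=rewrite | github.com/sarvex/pmtech | tools/pmbuild_ext/jsn.py | change_quotes
-- ===== SOURCE A (Python) =====
-- def is_inside_quotes(str_list, pos):
--     for s in str_list:
--         if pos < s[0]:
--             break
--         if s[0] < pos < s[1]:
--             return s[1]+1
--     return 0
--
-- def find_strings(jsn):
--     quote_types = ["\"", "'"]
--     oq = ""
--     prev_char = ""
--     istart = -1
--     str_list = []
--     for ic in range(0, len(jsn)):
--         c = jsn[ic]
--         if c in quote_types:
--             if oq == "":
--                 oq = c
--                 istart = ic
--             elif oq == c and prev_char != "\\":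
--                 oq = ""
--                 str_list.append((istart, ic))
--         prev_char = "" if prev_char == "\\" and c == "\\" else c
--     return str_list
--
-- def change_quotes(jsn):
--     str_list = find_strings(jsn)
--     conditioned = ""
--     prev = ""
--     for c in range(0, len(jsn)):
--         if c > 0:
--             prev = jsn[c-1]
--         char = jsn[c]
--         if char == "'":
--             if not is_inside_quotes(str_list, c):
--                 conditioned += "\""
--                 continue
--         elif char == "\"":
--             if is_inside_quotes(str_list, c) and prev != "\\":
--                 conditioned += "\\\""
--                 continue
--         conditioned += char
--     return conditioned
-- ===== SOURCE B (Python) =====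
-- def change_quotes(jsn):
--     # Tokenizer: instead of precomputing a span list and querying it per
--     # character, scan segment by segment: on a quote, look ahead for the
--     # matching closer (same escape rule) and emit the whole quoted segment at
--     # once; if none exists, the rest of the input is outside any string.
--     n = len(jsn)
--     out = []
--     i = 0
--     while i < n:
--         c = jsn[i]
--         if c == '"' or c == "'":
--             j = _find_close(jsn, i)
--             if j < 0:
--                 # unterminated string: everything from here on is outside
--                 out.extend('"' if ch == "'" else ch for ch in jsn[i:])
--                 break
--             out.append('"' if c == "'" else c)   # opening delimiter
--             prev = c
--             for d in jsn[i + 1:j]:               # string body (strictly inside)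
--                 if d == '"' and prev != "\\":
--                     out.append('\\"')
--                 else:
--                     out.append(d)
--                 prev = d
--             out.append('"' if c == "'" else c)   # closing delimiter
--             i = j + 1
--         else:
--             out.append(c)
--             i += 1
--     return "".join(out)
--
-- def _find_close(jsn, i):
--     # index of the closer matching the quote at i, or -1; escape-aware
--     oqc = jsn[i]
--     prev = oqc
--     for k in range(i + 1, len(jsn)):
--         d = jsn[k]
--         if d == oqc and prev != "\\":
--             return k
--         prev = "" if prev == "\\" and d == "\\" else d
--     return -1
-- ===== Notes on version B (the rewrite author's own statement) =====
-- stated objective: faster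
-- what changed: B is a segment tokenizer: it scans once, on each quote looks ahead for the escape-aware matching closer and emits the whole quoted segment at once, so A's span list and its per-character linear scan (is_inside_quotes) disappear entirely.
import Mathlib
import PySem

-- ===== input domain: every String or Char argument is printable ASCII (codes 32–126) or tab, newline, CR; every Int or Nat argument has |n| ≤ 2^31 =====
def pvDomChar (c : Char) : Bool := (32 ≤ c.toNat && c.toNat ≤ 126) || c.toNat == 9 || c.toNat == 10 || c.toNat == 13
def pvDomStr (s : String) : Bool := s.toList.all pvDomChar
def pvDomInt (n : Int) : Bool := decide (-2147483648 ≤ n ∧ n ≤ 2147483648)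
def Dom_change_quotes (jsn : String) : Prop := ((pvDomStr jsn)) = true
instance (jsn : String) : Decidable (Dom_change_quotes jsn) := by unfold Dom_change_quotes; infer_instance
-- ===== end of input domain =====

-- B replaces A's two-phase span-list construction + per-character span-list scan by a
-- single segment tokenizer that looks ahead for the matching closer and emits segment-wise.

-- ===== PORT A =====
def is_inside_quotes : List (Int × Int) → Int → Int
  | [], _ => 0
  | s :: rest, pos =>
    if pos < s.1 then 0
    else if s.1 < pos ∧ pos < s.2 then s.2 + 1
    else is_inside_quotes rest pos

-- one iteration of find_strings' loop; state = (ic, oq, prev_char, istart, str_list)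
def fsStep : (Int × List Char × List Char × Int × List (Int × Int)) → Char →
    (Int × List Char × List Char × Int × List (Int × Int))
  | (ic, oq, prev, istart, acc), c =>
    let prev' := if prev = ['\\'] ∧ c = '\\' then ([] : List Char) else [c]
    if c = '"' ∨ c = '\'' then
      if oq = [] then (ic + 1, [c], prev', ic, acc)
      else if oq = [c] ∧ prev ≠ ['\\'] then (ic + 1, [], prev', istart, acc ++ [(istart, ic)])
      else (ic + 1, oq, prev', istart, acc)
    else (ic + 1, oq, prev', istart, acc)

def find_strings (l : List Char) : List (Int × Int) :=
  (l.foldl fsStep (0, [], [], -1, [])).2.2.2.2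

-- one iteration of change_quotes' loop; state = (c, prev, conditioned)
def cqStep (strs : List (Int × Int)) (l : List Char) :
    (Int × List Char × List Char) → Char → (Int × List Char × List Char)
  | (c, prev0, acc), char =>
    let prev := if 0 < c then [PySem.List.pyGetD l (c - 1) ' '] else prev0  -- jsn[c-1], always in range
    let acc' :=
      if char = '\'' then
        if is_inside_quotes strs c = 0 then acc ++ ['"'] else acc ++ [char]
      else if char = '"' then
        if is_inside_quotes strs c ≠ 0 ∧ prev ≠ ['\\'] then acc ++ ['\\', '"'] else acc ++ [char]
      else acc ++ [char]
    (c + 1, prev, acc')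

def change_quotes (jsn : String) : String :=
  let l := jsn.toList
  let strs := find_strings l
  String.ofList ((l.foldl (cqStep strs l) (0, [], [])).2.2)

-- ===== PORT B =====
-- _find_close: scan from the opener for the escape-aware matching closer; instead of the
-- Python index j this port returns the induced split (body = jsn[i+1:j], after = jsn[j+1:]).
def findCloseAux (oqc : Char) : List Char → List Char → Option (List Char × List Char)
  | _, [] => none
  | prev, d :: ds =>
    if d = oqc ∧ prev ≠ ['\\'] then some ([], ds)
    else
      match findCloseAux oqc (if prev = ['\\'] ∧ d = '\\' then [] else [d]) ds with
      | none => none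
      | some (b, a) => some (d :: b, a)

theorem findCloseAux_split (oqc : Char) (cs : List Char) : ∀ (prev b a : List Char),
    findCloseAux oqc prev cs = some (b, a) → cs = b ++ oqc :: a := by
  induction cs with
  | nil => intro prev b a h; simp [findCloseAux] at h
  | cons d ds ih =>
    intro prev b a h
    simp only [findCloseAux] at h
    by_cases h1 : d = oqc ∧ prev ≠ ['\\']
    · rw [if_pos h1] at h
      obtain ⟨rfl, rfl⟩ := Prod.mk.injEq .. ▸ Option.some.inj h
      simp [h1.1]
    · rw [if_neg h1] at h
      rcases hm : findCloseAux oqc (if prev = ['\\'] ∧ d = '\\' then [] else [d]) ds with _ | ⟨b', a'⟩ <;> rw [hm] at h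
      · exact absurd h (by simp)
      · obtain ⟨rfl, rfl⟩ := Prod.mk.injEq .. ▸ Option.some.inj h
        simp [ih _ _ _ hm]

theorem findCloseAux_len (oqc : Char) (prev b a cs : List Char)
    (h : findCloseAux oqc prev cs = some (b, a)) : a.length < cs.length := by
  rw [findCloseAux_split oqc cs prev b a h]; simp; omega

-- body rewrite: inside a string only a double quote with non-backslash raw prev changes
def emitBody : Char → List Char → List Char
  | _, [] => []
  | prev, d :: ds => (if d = '"' ∧ prev ≠ '\\' then ['\\', '"'] else [d]) ++ emitBody d ds

-- main tokenizer loop (Source B's while loop, recursion on the remaining suffix)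
def go : List Char → List Char
  | [] => []
  | c :: rest =>
    if c = '"' ∨ c = '\'' then
      match hm : findCloseAux c [c] rest with
      | some (body, after) =>
          (if c = '\'' then '"' else c) ::
            (emitBody c body ++ (if c = '\'' then '"' else c) :: go after)
      | none => (c :: rest).map (fun e => if e = '\'' then '"' else e)
    else c :: go rest
termination_by l => l.length
decreasing_by
  · exact Nat.lt_succ_of_lt (findCloseAux_len _ _ _ _ _ hm)
  · simp

def change_quotes_alt (jsn : String) : String := String.ofList (go jsn.toList)

-- ===== PRECONDITION & SPEC =====
def Spec_change_quotes (jsn : String) (out : String) : Prop := out = change_quotes_alt jsn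
instance (jsn : String) (out : String) : Decidable (Spec_change_quotes jsn out) := by unfold Spec_change_quotes; infer_instance

-- ===== CLAIM (what is proved, stated in full; the proofs are below) =====
def Claim_equal_change_quotes : Prop := ∀ (jsn : String), Dom_change_quotes jsn → Spec_change_quotes jsn (change_quotes jsn)

-- ===== LEMMAS AND PROOFS =====

-- strictly-inside predicate over a span list
def insideAt (S : List (Int × Int)) (pos : Int) : Prop := ∃ s ∈ S, s.1 < pos ∧ pos < s.2

-- the spans A's find_strings produces, described by B's segment structure
def spansFrom : Int → List Char → List (Int × Int)
  | _, [] => []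
  | k, c :: rest =>
    if c = '"' ∨ c = '\'' then
      match hm : findCloseAux c [c] rest with
      | some (body, after) => (k, k + 1 + body.length) :: spansFrom (k + 2 + body.length) after
      | none => []
    else spansFrom (k + 1) rest
termination_by _ l => l.length
decreasing_by
  · exact Nat.lt_succ_of_lt (findCloseAux_len _ _ _ _ _ hm)
  · simp

-- one position of A's rewrite loop
def emit1 (S : List (Int × Int)) (k : Int) (p : List Char) (c : Char) : List Char :=
  if c = '\'' then (if is_inside_quotes S k = 0 then ['"'] else [c])
  else if c = '"' then
    (if is_inside_quotes S k ≠ 0 ∧ p ≠ ['\\'] then ['\\', '"'] else [c])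
  else [c]

-- A's rewrite loop as a positional recursion (prev threaded explicitly)
def rewrite (S : List (Int × Int)) : Int → List Char → List Char → List Char
  | _, _, [] => []
  | k, p, c :: rest => emit1 S k p c ++ rewrite S (k + 1) [c] rest

theorem cq_fold_eq_rewrite (S : List (Int × Int)) (l : List Char) (cs : List Char) :
    ∀ (k : Nat) (prevA p acc : List Char), l.drop k = cs →
      (k = 0 → prevA = p) → (0 < k → p = [PySem.List.pyGetD l ((k : Int) - 1) ' ']) →
      (cs.foldl (cqStep S l) ((k : Int), prevA, acc)).2.2 = acc ++ rewrite S (k : Int) p cs := by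
  induction cs with
  | nil => intro k prevA p acc _ _ _; simp [rewrite]
  | cons c cs ih =>
    intro k prevA p acc hdrop h0 hpos
    have hk : k < l.length := by
      have := congrArg List.length hdrop
      simp [List.length_drop] at this
      omega
    have hgk : l[k]? = some c := by
      have h0' : (l.drop k)[0]? = some c := by rw [hdrop]; rfl
      rw [List.getElem?_drop] at h0'
      simpa using h0'
    have hdrop' : l.drop (k + 1) = cs := by
      have ht : (l.drop k).tail = cs := by rw [hdrop]; rfl
      rwa [List.tail_drop] at ht
    have hpg : PySem.List.pyGetD l ((k : Int)) ' ' = c := by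
      simp [PySem.List.pyGetD_natCast, List.getD_eq_getElem?_getD, hgk]
    have hprev : (if 0 < (k : Int) then [PySem.List.pyGetD l ((k : Int) - 1) ' '] else prevA) = p := by
      by_cases hk0 : k = 0
      · subst hk0; simpa using h0 rfl
      · have hkpos : 0 < k := Nat.pos_of_ne_zero hk0
        rw [if_pos (by exact_mod_cast hkpos), hpos hkpos]
    have hstep : cqStep S l ((k : Int), prevA, acc) c = ((k : Int) + 1, p, acc ++ emit1 S k p c) := by
      simp only [cqStep, hprev, emit1]
      by_cases hc1 : c = '\''
      · by_cases hz : is_inside_quotes S (k : Int) = 0 <;> simp [hc1, hz]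
      · by_cases hc2 : c = '"'
        · by_cases hz : is_inside_quotes S (k : Int) ≠ 0 ∧ p ≠ ['\\'] <;> simp [hc1, hc2, hz]
        · simp [hc1, hc2]
    have ihres := ih (k + 1) p [c] (acc ++ emit1 S k p c) hdrop'
      (fun h => absurd h (Nat.succ_ne_zero k))
      (fun _ => by rw [show ((k + 1 : Nat) : Int) - 1 = (k : Int) by push_cast; ring, hpg])
    simp only [List.foldl_cons, hstep]
    rw [show ((k + 1 : Nat) : Int) = (k : Int) + 1 by push_cast; ring] at ihres
    rw [ihres, rewrite, List.append_assoc]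

-- unfolding equations for the well-founded definitions spansFrom and go
theorem spansFrom_some (k : Int) (c : Char) (rest body after : List Char)
    (hq : c = '"' ∨ c = '\'') (hm : findCloseAux c [c] rest = some (body, after)) :
    spansFrom k (c :: rest) = (k, k + 1 + body.length) :: spansFrom (k + 2 + body.length) after := by
  rw [spansFrom, if_pos hq]
  split
  · next b a heq => rw [hm] at heq; obtain ⟨rfl, rfl⟩ := Prod.mk.injEq .. ▸ Option.some.inj heq; rfl
  · next heq => rw [hm] at heq; exact absurd heq (by simp)

theorem spansFrom_none (k : Int) (c : Char) (rest : List Char)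
    (hq : c = '"' ∨ c = '\'') (hm : findCloseAux c [c] rest = none) :
    spansFrom k (c :: rest) = [] := by
  rw [spansFrom, if_pos hq]
  split
  · next b a heq => rw [hm] at heq; exact absurd heq (by simp)
  · rfl

theorem spansFrom_nq (k : Int) (c : Char) (rest : List Char) (hq : ¬(c = '"' ∨ c = '\'')) :
    spansFrom k (c :: rest) = spansFrom (k + 1) rest := by
  rw [spansFrom, if_neg hq]

theorem go_some (c : Char) (rest body after : List Char)
    (hq : c = '"' ∨ c = '\'') (hm : findCloseAux c [c] rest = some (body, after)) :
    go (c :: rest) =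
      (if c = '\'' then '"' else c) ::
        (emitBody c body ++ (if c = '\'' then '"' else c) :: go after) := by
  rw [go, if_pos hq]
  split
  · next b a heq => rw [hm] at heq; obtain ⟨rfl, rfl⟩ := Prod.mk.injEq .. ▸ Option.some.inj heq; rfl
  · next heq => rw [hm] at heq; exact absurd heq (by simp)

theorem go_none (c : Char) (rest : List Char)
    (hq : c = '"' ∨ c = '\'') (hm : findCloseAux c [c] rest = none) :
    go (c :: rest) = (c :: rest).map (fun e => if e = '\'' then '"' else e) := by
  rw [go, if_pos hq]
  split
  · next b a heq => rw [hm] at heq; exact absurd heq (by simp)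
  · rfl

theorem go_nq (c : Char) (rest : List Char) (hq : ¬(c = '"' ∨ c = '\'')) :
    go (c :: rest) = c :: go rest := by
  rw [go, if_neg hq]

-- A's find_strings loop, run from an open-string state, across one matched string
theorem fsBody_some (oqc : Char) (hq : oqc = '"' ∨ oqc = '\'') (cs : List Char) :
    ∀ (prev : List Char) (k istart : Int) (acc : List (Int × Int)) (body after : List Char),
      findCloseAux oqc prev cs = some (body, after) →
      cs.foldl fsStep (k, [oqc], prev, istart, acc) =
        after.foldl fsStep (k + body.length + 1, [], [oqc], istart,
          acc ++ [(istart, k + body.length)]) := by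
  have hoqc : oqc ≠ '\\' := by rcases hq with rfl | rfl <;> decide
  induction cs with
  | nil => intro prev k istart acc body after h; simp [findCloseAux] at h
  | cons d ds ih =>
    intro prev k istart acc body after h
    simp only [findCloseAux] at h
    by_cases h1 : d = oqc ∧ prev ≠ ['\\']
    · rw [if_pos h1] at h
      obtain ⟨rfl, rfl⟩ := Prod.mk.injEq .. ▸ Option.some.inj h
      have hstep : fsStep (k, [oqc], prev, istart, acc) d =
          (k + 1, [], [oqc], istart, acc ++ [(istart, k)]) := by
        simp only [fsStep]
        rw [if_pos (h1.1 ▸ hq)]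
        have : ¬([oqc] : List Char) = [] := by simp
        rw [if_neg this, if_pos ⟨by simp [h1.1], h1.2⟩]
        have : ¬(prev = ['\\'] ∧ d = '\\') := fun hc => hoqc (h1.1 ▸ hc.2)
        simp [this, h1.1]
        exact fun _ => hoqc
      rw [List.foldl_cons, hstep]
      norm_num
    · rw [if_neg h1] at h
      rcases hm : findCloseAux oqc (if prev = ['\\'] ∧ d = '\\' then [] else [d]) ds
        with _ | ⟨b, a⟩ <;> rw [hm] at h
      · exact absurd h (by simp)
      · obtain ⟨rfl, rfl⟩ := Prod.mk.injEq .. ▸ Option.some.inj h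
        have hstep : fsStep (k, [oqc], prev, istart, acc) d =
            (k + 1, [oqc], if prev = ['\\'] ∧ d = '\\' then [] else [d], istart, acc) := by
          simp only [fsStep]
          by_cases he : d = '"' ∨ d = '\''
          · rw [if_pos he, if_neg (by simp : ¬([oqc] : List Char) = [])]
            have hno : ¬([oqc] = [d] ∧ prev ≠ ['\\']) := by
              intro hc; exact h1 ⟨by simpa using hc.1.symm, hc.2⟩
            rw [if_neg hno]
          · rw [if_neg he]
        rw [List.foldl_cons, hstep, ih _ _ _ _ _ _ hm]
        push_cast [List.length_cons]
        ring_nf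

theorem fsBody_none (oqc : Char) (hq : oqc = '"' ∨ oqc = '\'') (cs : List Char) :
    ∀ (prev : List Char) (k istart : Int) (acc : List (Int × Int)),
      findCloseAux oqc prev cs = none →
      (cs.foldl fsStep (k, [oqc], prev, istart, acc)).2.2.2.2 = acc := by
  induction cs with
  | nil => intro prev k istart acc _; rfl
  | cons d ds ih =>
    intro prev k istart acc h
    simp only [findCloseAux] at h
    by_cases h1 : d = oqc ∧ prev ≠ ['\\']
    · rw [if_pos h1] at h; exact absurd h (by simp)
    · rw [if_neg h1] at h
      rcases hm : findCloseAux oqc (if prev = ['\\'] ∧ d = '\\' then [] else [d]) ds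
        with _ | ⟨b, a⟩ <;> rw [hm] at h
      · have hstep : fsStep (k, [oqc], prev, istart, acc) d =
            (k + 1, [oqc], if prev = ['\\'] ∧ d = '\\' then [] else [d], istart, acc) := by
          simp only [fsStep]
          by_cases he : d = '"' ∨ d = '\''
          · rw [if_pos he, if_neg (by simp : ¬([oqc] : List Char) = [])]
            have hno : ¬([oqc] = [d] ∧ prev ≠ ['\\']) := by
              intro hc; exact h1 ⟨by simpa using hc.1.symm, hc.2⟩
            rw [if_neg hno]
          · rw [if_neg he]
        rw [List.foldl_cons, hstep]
        exact ih _ _ _ _ hm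
      · exact absurd h (by simp)

theorem spans_main : ∀ (n : Nat) (cs : List Char), cs.length ≤ n →
    ∀ (prev : List Char) (k istart : Int) (acc : List (Int × Int)),
      (cs.foldl fsStep (k, [], prev, istart, acc)).2.2.2.2 = acc ++ spansFrom k cs := by
  intro n
  induction n with
  | zero =>
    intro cs h _ _ _ _
    obtain rfl : cs = [] := List.eq_nil_of_length_eq_zero (by omega)
    simp [spansFrom]
  | succ m ih =>
    intro cs hlen prev k istart acc
    match cs with
    | [] => simp [spansFrom]
    | c :: rest =>
      by_cases hq : c = '"' ∨ c = '\''
      · have hc : c ≠ '\\' := by rcases hq with rfl | rfl <;> decide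
        have hstep : fsStep (k, [], prev, istart, acc) c = (k + 1, [c], [c], k, acc) := by
          simp only [fsStep]
          rw [if_pos hq]
          simp [hc]
        rcases hm : findCloseAux c [c] rest with _ | ⟨body, after⟩
        · rw [List.foldl_cons, hstep, spansFrom_none k c rest hq hm,
            fsBody_none c hq rest [c] (k + 1) k acc hm]
          simp
        · have hal : after.length ≤ m := by
            have h2 := findCloseAux_len c [c] body after rest hm
            simp only [List.length_cons] at hlen
            omega
          rw [List.foldl_cons, hstep, fsBody_some c hq rest [c] (k + 1) k acc body after hm,
            ih after hal [c] (k + 1 + body.length + 1) k (acc ++ [(k, k + 1 + body.length)]),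
            spansFrom_some k c rest body after hq hm]
          have he : k + 1 + (body.length : Int) + 1 = k + 2 + body.length := by ring
          rw [he, List.append_assoc]
          rfl
      · have hstep : fsStep (k, [], prev, istart, acc) c =
            (k + 1, [], if prev = ['\\'] ∧ c = '\\' then [] else [c], istart, acc) := by
          simp only [fsStep]
          rw [if_neg hq]
        rw [List.foldl_cons, hstep, spansFrom_nq k c rest hq]
        exact ih rest (by simp only [List.length_cons] at hlen; omega) _ _ _ _

theorem find_strings_eq_spansFrom (l : List Char) : find_strings l = spansFrom 0 l := by
  unfold find_strings
  exact spans_main l.length l le_rfl [] 0 (-1) []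

theorem spansFrom_wf_aux : ∀ (n : Nat) (cs : List Char), cs.length ≤ n → ∀ (k : Int),
    (∀ s ∈ spansFrom k cs, k ≤ s.1 ∧ s.1 < s.2 ∧ s.2 < k + cs.length) ∧
      (spansFrom k cs).Pairwise (fun a b => a.2 < b.1) := by
  intro n
  induction n with
  | zero =>
    intro cs h k
    obtain rfl : cs = [] := List.eq_nil_of_length_eq_zero (by omega)
    simp [spansFrom]
  | succ m ih =>
    intro cs hlen k
    match cs with
    | [] => simp [spansFrom]
    | c :: rest =>
      by_cases hq : c = '"' ∨ c = '\''
      · rcases hm : findCloseAux c [c] rest with _ | ⟨body, after⟩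
        · rw [spansFrom_none k c rest hq hm]; simp
        · rw [spansFrom_some k c rest body after hq hm]
          have hsplit := findCloseAux_split c rest [c] body after hm
          have hlen2 : rest.length = body.length + 1 + after.length := by
            rw [hsplit]; simp; omega
          have hal : after.length ≤ m := by
            simp only [List.length_cons] at hlen; omega
          obtain ⟨ha, hp⟩ := ih after hal (k + 2 + body.length)
          constructor
          · intro s hs
            rcases List.mem_cons.1 hs with rfl | hs'
            · simp only [List.length_cons]
              refine ⟨le_refl _, by omega, by omega⟩
            · obtain ⟨hb1, hb2, hb3⟩ := ha s hs'
              simp only [List.length_cons]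
              refine ⟨by omega, hb2, by omega⟩
          · rw [List.pairwise_cons]
            exact ⟨fun b hb => by have := (ha b hb).1; simpa using by omega, hp⟩
      · rw [spansFrom_nq k c rest hq]
        obtain ⟨ha, hp⟩ := ih rest (by simp only [List.length_cons] at hlen; omega) (k + 1)
        refine ⟨fun s hs => ?_, hp⟩
        obtain ⟨hb1, hb2, hb3⟩ := ha s hs
        simp only [List.length_cons]
        exact ⟨by omega, hb2, by omega⟩

theorem spansFrom_wf (cs : List Char) (k : Int) :
    (∀ s ∈ spansFrom k cs, k ≤ s.1 ∧ s.1 < s.2 ∧ s.2 < k + cs.length) ∧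
      (spansFrom k cs).Pairwise (fun a b => a.2 < b.1) :=
  spansFrom_wf_aux cs.length cs le_rfl k

theorem iiq_eq_zero_iff (S : List (Int × Int)) (h1 : ∀ s ∈ S, 0 ≤ s.1 ∧ s.1 < s.2)
    (h2 : S.Pairwise (fun a b => a.2 < b.1)) (pos : Int) :
    is_inside_quotes S pos = 0 ↔ ¬ insideAt S pos := by
  induction S with
  | nil => simp [is_inside_quotes, insideAt]
  | cons s rest ih =>
    have hs1 := h1 s (by simp)
    have hrest1 : ∀ t ∈ rest, 0 ≤ t.1 ∧ t.1 < t.2 := fun t ht => h1 t (by simp [ht])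
    have hpair : ∀ t ∈ rest, s.2 < t.1 := (List.pairwise_cons.1 h2).1
    have h2' := (List.pairwise_cons.1 h2).2
    simp only [is_inside_quotes, insideAt]
    by_cases hb : pos < s.1
    · rw [if_pos hb]
      constructor
      · rintro - ⟨t, ht, htc⟩
        rcases List.mem_cons.1 ht with rfl | ht'
        · omega
        · have := hpair t ht'; omega
      · intro _; rfl
    · rw [if_neg hb]
      by_cases hc : s.1 < pos ∧ pos < s.2
      · rw [if_pos hc]
        constructor
        · intro h0; omega
        · intro hno; exact absurd ⟨s, by simp, hc⟩ hno
      · rw [if_neg hc, ih hrest1 h2']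
        unfold insideAt
        constructor
        · rintro hno ⟨t, ht, htc⟩
          rcases List.mem_cons.1 ht with rfl | ht'
          · exact hc htc
          · exact hno ⟨t, ht', htc⟩
        · rintro hno ⟨t, ht, htc⟩
          exact hno ⟨t, by simp [ht], htc⟩

theorem go_nil : go [] = [] := by rw [go]

theorem emit1_zero (S : List (Int × Int)) (k : Int) (p : List Char) (c : Char)
    (hz : is_inside_quotes S k = 0) :
    emit1 S k p c = [if c = '\'' then '"' else c] := by
  unfold emit1
  by_cases hc1 : c = '\''
  · simp [hc1, hz]
  · by_cases hc2 : c = '"' <;> simp [hc1, hc2, hz]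

theorem rw_body (S : List (Int × Int)) : ∀ (body : List Char) (k : Int) (prevc : Char)
    (tail : List Char),
    (∀ t : Nat, t < body.length → is_inside_quotes S (k + t) ≠ 0) →
    ∃ p, rewrite S k [prevc] (body ++ tail) =
      emitBody prevc body ++ rewrite S (k + body.length) p tail := by
  intro body
  induction body with
  | nil => intro k prevc tail _; exact ⟨[prevc], by simp [emitBody]⟩
  | cons d ds ih =>
    intro k prevc tail h
    have h0 : is_inside_quotes S k ≠ 0 := by
      have := h 0 (by simp); simpa using this
    have hemit : emit1 S k [prevc] d =
        (if d = '"' ∧ prevc ≠ '\\' then ['\\', '"'] else [d]) := by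
      unfold emit1
      by_cases hc1 : d = '\''
      · simp [hc1, h0]
      · by_cases hc2 : d = '"'
        · by_cases hp : prevc = '\\' <;> simp [hc1, hc2, hp, h0]
        · simp [hc1, hc2]
    obtain ⟨p, hp⟩ := ih (k + 1) d tail (fun t ht => by
      have h2 := h (t + 1) (by simp only [List.length_cons]; omega)
      have he : (k : Int) + ((t : Nat) + 1 : Nat) = (k + 1) + t := by push_cast; ring
      rwa [he] at h2)
    refine ⟨p, ?_⟩
    simp only [List.cons_append, rewrite, hemit, emitBody, hp, List.length_cons]
    rw [show (k : Int) + ((ds.length : Nat) + 1 : Nat) = k + 1 + ds.length by push_cast; ring,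
      List.append_assoc]

theorem rw_outside (S : List (Int × Int)) : ∀ (cs : List Char) (k : Int) (p : List Char),
    (∀ t : Nat, t < cs.length → is_inside_quotes S (k + t) = 0) →
    rewrite S k p cs = cs.map (fun e => if e = '\'' then '"' else e) := by
  intro cs
  induction cs with
  | nil => intro k p _; rfl
  | cons c rest ih =>
    intro k p h
    have h0 : is_inside_quotes S k = 0 := by
      have := h 0 (by simp); simpa using this
    simp only [rewrite, emit1_zero S k p c h0, List.map_cons]
    rw [ih (k + 1) [c] (fun t ht => by
      have h2 := h (t + 1) (by simp only [List.length_cons]; omega)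
      have he : (k : Int) + ((t : Nat) + 1 : Nat) = (k + 1) + t := by push_cast; ring
      rwa [he] at h2)]
    simp

theorem rewrite_eq_go (S : List (Int × Int)) (h1 : ∀ s ∈ S, 0 ≤ s.1 ∧ s.1 < s.2)
    (h2 : S.Pairwise (fun a b => a.2 < b.1)) :
    ∀ (n : Nat) (cs : List Char), cs.length ≤ n → ∀ (k : Int) (p : List Char),
      (∀ pos : Int, k ≤ pos → (insideAt S pos ↔ insideAt (spansFrom k cs) pos)) →
      rewrite S k p cs = go cs := by
  have hiq : ∀ pos, is_inside_quotes S pos = 0 ↔ ¬ insideAt S pos := iiq_eq_zero_iff S h1 h2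
  intro n
  induction n with
  | zero =>
    intro cs h k p _
    obtain rfl : cs = [] := List.eq_nil_of_length_eq_zero (by omega)
    rw [go_nil]; rfl
  | succ m ih =>
    intro cs hlen k p H
    match cs with
    | [] => rw [go_nil]; rfl
    | c :: rest =>
      by_cases hq : c = '"' ∨ c = '\''
      · rcases hm : findCloseAux c [c] rest with _ | ⟨body, after⟩
        · rw [go_none c rest hq hm]
          refine rw_outside S (c :: rest) k p (fun t ht => ?_)
          rw [hiq]
          intro hin
          have h3 := (H (k + t) (by omega)).1 hin
          rw [spansFrom_none k c rest hq hm] at h3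
          exact absurd h3 (by simp [insideAt])
        · have hsplit := findCloseAux_split c rest [c] body after hm
          have hSF := spansFrom_some k c rest body after hq hm
          have hwfT := (spansFrom_wf after (k + 2 + body.length)).1
          have hkout : ¬ insideAt S k := by
            intro hin
            have h3 := (H k le_rfl).1 hin
            rw [hSF] at h3
            obtain ⟨s, hs, hc1, hc2⟩ := h3
            rcases List.mem_cons.1 hs with rfl | hs'
            · simp at hc1
            · have := (hwfT s hs').1; omega
          have hjout : ¬ insideAt S (k + 1 + body.length) := by
            intro hin
            have h3 := (H (k + 1 + body.length) (by omega)).1 hin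
            rw [hSF] at h3
            obtain ⟨s, hs, hc1, hc2⟩ := h3
            rcases List.mem_cons.1 hs with rfl | hs'
            · simp at hc2
            · have := (hwfT s hs').1; omega
          have hbodyin : ∀ t : Nat, t < body.length → is_inside_quotes S (k + 1 + t) ≠ 0 := by
            intro t ht hz0
            have hin : insideAt (spansFrom k (c :: rest)) (k + 1 + t) := by
              rw [hSF]
              exact ⟨(k, k + 1 + body.length), by simp, by omega, by push_cast; omega⟩
            exact ((hiq _).1 hz0) ((H _ (by omega)).2 hin)
          have hH' : ∀ pos : Int, k + 1 + body.length + 1 ≤ pos →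
              (insideAt S pos ↔ insideAt (spansFrom (k + 1 + body.length + 1) after) pos) := by
            intro pos hpos
            have hcast : (k : Int) + 2 + body.length = k + 1 + body.length + 1 := by ring
            rw [H pos (by omega), hSF, ← hcast]
            unfold insideAt
            constructor
            · rintro ⟨s, hs, hx⟩
              rcases List.mem_cons.1 hs with rfl | hs'
              · exact absurd hx.2 (by omega)
              · exact ⟨s, hs', hx⟩
            · rintro ⟨s, hs, hx⟩
              exact ⟨s, by simp [hs], hx⟩
          have hal : after.length ≤ m := by
            have := findCloseAux_len c [c] body after rest hm
            simp only [List.length_cons] at hlen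
            omega
          rw [go_some c rest body after hq hm]
          simp only [rewrite]
          rw [emit1_zero S k p c ((hiq k).2 hkout), hsplit]
          obtain ⟨p', hbody⟩ := rw_body S body (k + 1) c (c :: after) (fun t ht => by
            have h2 := hbodyin t ht
            have he : (k : Int) + 1 + t = (k + 1) + t := by ring
            rwa [← he] at h2)
          rw [hbody,
            show (k : Int) + 1 + body.length = k + 1 + body.length from rfl]
          simp only [rewrite]
          rw [emit1_zero S (k + 1 + body.length) p' c ((hiq _).2 hjout)]
          rw [ih after hal (k + 1 + body.length + 1) [c] hH']
          simp
      · rw [go_nq c rest hq]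
        simp only [rewrite]
        have hkz : is_inside_quotes S k = 0 := by
          rw [hiq]
          intro hin
          have h3 := (H k le_rfl).1 hin
          rw [spansFrom_nq k c rest hq] at h3
          obtain ⟨s, hs, hc1, hc2⟩ := h3
          have := ((spansFrom_wf rest (k + 1)).1 s hs).1
          omega
        rw [emit1_zero S k p c hkz, if_neg (fun e => hq (Or.inr e))]
        have hH' : ∀ pos : Int, k + 1 ≤ pos →
            (insideAt S pos ↔ insideAt (spansFrom (k + 1) rest) pos) := by
          intro pos hpos
          rw [H pos (by omega), spansFrom_nq k c rest hq]
        rw [ih rest (by simp only [List.length_cons] at hlen; omega) (k + 1) [c] hH']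
        simp

theorem change_quotes_eq_alt (jsn : String) : change_quotes jsn = change_quotes_alt jsn := by
  unfold change_quotes change_quotes_alt
  have hfold := cq_fold_eq_rewrite (find_strings jsn.toList) jsn.toList jsn.toList 0 [] [] [] rfl
    (fun _ => rfl) (fun h => absurd h (by omega))
  simp only [Nat.cast_zero, List.nil_append] at hfold
  have hS := find_strings_eq_spansFrom jsn.toList
  have hwf := spansFrom_wf jsn.toList 0
  have h1 : ∀ s ∈ find_strings jsn.toList, 0 ≤ s.1 ∧ s.1 < s.2 := by
    intro s hs
    rw [hS] at hs
    have := hwf.1 s hs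
    exact ⟨by omega, this.2.1⟩
  have h2 : (find_strings jsn.toList).Pairwise (fun a b => a.2 < b.1) := by
    rw [hS]; exact hwf.2
  have hgo := rewrite_eq_go (find_strings jsn.toList) h1 h2 jsn.toList.length jsn.toList le_rfl
    0 [] (fun pos _ => by rw [hS])
  show String.ofList (List.foldl (cqStep (find_strings jsn.toList) jsn.toList) (0, [], []) jsn.toList).2.2 = String.ofList (go jsn.toList)
  rw [hfold, hgo]

-- ===== VERDICT (by name: the statement is the Claim_ definition above) =====
theorem change_quotes_spec : Claim_equal_change_quotes := by
  intro jsn _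
  unfold Spec_change_quotes
  exact change_quotes_eq_alt jsn
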